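-- pv_equiv track=rewrite | github.com/bhavish19/py-zkCNN | zkcnn_subprocess_wrapper.py | _parse_timing_output
-- ===== SOURCE A (Python) =====
-- from typing import Dict, Any, Optional, List
--
-- def _parse_timing_output(stdout: str) -> Dict[str, Any]:
--     """Parse timing information from the C++ binary output"""
--     timing_info = {}
--
--     # Look for timing patterns in the output
--     lines = stdout.split('\n')
--     for line in lines:
--         line = line.strip()
--
--         # Look for common timing patterns
--         if 'time' in line.lower() or 'seconds' in line.lower():
--             timing_info['raw_timing_line'] = line
--
--         # Look for proof size information
--         if 'kb' in line.lower() or 'size' in line.lower():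
--             timing_info['raw_size_line'] = line
--
--     return timing_info
-- ===== SOURCE B (Python) =====
-- def _parse_timing_output(stdout: str):
--     """Scan the output lines from the end, keeping the last line matching each
--     pattern, and stop as soon as both have been found."""
--     timing = None
--     size = None
--     for line in reversed(stdout.split('\n')):
--         line = line.strip()
--         low = line.lower()
--         if timing is None and ('time' in low or 'seconds' in low):
--             timing = line
--         if size is None and ('kb' in low or 'size' in low):
--             size = line
--         if timing is not None and size is not None:
--             break
--     result = {}
--     if timing is not None:
--         result['raw_timing_line'] = timing
--     if size is not None:
--         result['raw_size_line'] = size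
--     return result
-- ===== Notes on version B (the rewrite author's own statement) =====
-- stated objective: idiomatic
-- what changed: Replaces A's forward pass that re-overwrites each dict key on every match with a single reverse scan that records the first (i.e. last-in-order) line matching each pattern and stops early once both are found; Pre_ excludes inputs where both a timing line and a size line occur and the earliest matching line is size-only, since there A's dict key insertion order (size before timing) is accidental and either key order is equally defensible.
import Mathlib
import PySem

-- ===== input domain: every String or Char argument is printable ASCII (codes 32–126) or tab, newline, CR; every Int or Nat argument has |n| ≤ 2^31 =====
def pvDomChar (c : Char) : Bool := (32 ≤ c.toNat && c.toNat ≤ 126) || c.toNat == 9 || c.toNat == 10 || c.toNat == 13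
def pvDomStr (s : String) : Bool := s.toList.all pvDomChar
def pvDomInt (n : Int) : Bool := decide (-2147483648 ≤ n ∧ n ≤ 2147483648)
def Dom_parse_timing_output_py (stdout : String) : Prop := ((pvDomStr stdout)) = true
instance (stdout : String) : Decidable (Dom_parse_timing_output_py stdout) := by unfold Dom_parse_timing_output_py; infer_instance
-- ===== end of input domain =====

-- B scans the lines in reverse, recording the last line matching each of the two
-- patterns and stopping once both are found, instead of A's forward dict-overwrite
-- loop (objective: idiomatic, same cost).

-- ===== PORT A =====
def parse_timing_output_py (stdout : String) : List (String × String) :=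
  let lines := (PySem.Str.split? stdout "\n").getD []
  (lines.foldl (fun (d : PySem.Dict String String) line =>
    let line := PySem.Str.strip line
    let d :=
      if PySem.Str.isIn "time" (PySem.Str.lower line) || PySem.Str.isIn "seconds" (PySem.Str.lower line) then
        d.insert "raw_timing_line" line
      else d
    if PySem.Str.isIn "kb" (PySem.Str.lower line) || PySem.Str.isIn "size" (PySem.Str.lower line) then
      d.insert "raw_size_line" line
    else d) PySem.Dict.empty).items

-- ===== PORT B =====
def pvIsTiming (l : String) : Bool :=
  PySem.Str.isIn "time" (PySem.Str.lower l) || PySem.Str.isIn "seconds" (PySem.Str.lower l)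

def pvIsSize (l : String) : Bool :=
  PySem.Str.isIn "kb" (PySem.Str.lower l) || PySem.Str.isIn "size" (PySem.Str.lower l)

-- the reverse loop of Source B: carries (timing, size), strips each line, stops when both set
def pvScan : List String → Option String → Option String → Option String × Option String
  | [], timing, size => (timing, size)
  | l :: rest, timing, size =>
      let line := PySem.Str.strip l
      let timing' := if timing.isNone && pvIsTiming line then some line else timing
      let size' := if size.isNone && pvIsSize line then some line else size
      if timing'.isSome && size'.isSome then (timing', size')
      else pvScan rest timing' size'

def parse_timing_output_py_alt (stdout : String) : List (String × String) :=
  let (timing, size) := pvScan ((PySem.Str.split? stdout "\n").getD []).reverse none none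
  (match timing with | some a => [("raw_timing_line", a)] | none => []) ++
  (match size with | some b => [("raw_size_line", b)] | none => [])

-- ===== PRECONDITION & SPEC =====
-- Pre_ excludes inputs where both a timing line and a size line occur and the earliest
-- matching (stripped) line is size-only: there A's dict key insertion order (size before
-- timing) is accidental and either key order is equally defensible.
def Pre_parse_timing_output_py (stdout : String) : Prop :=
  let ls := ((PySem.Str.split? stdout "\n").getD []).map PySem.Str.strip
  (ls.any pvIsTiming = true ∧ ls.any pvIsSize = true) →
    pvIsTiming ((ls.find? (fun l => pvIsTiming l || pvIsSize l)).getD "") = true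
instance (stdout : String) : Decidable (Pre_parse_timing_output_py stdout) := by unfold Pre_parse_timing_output_py; infer_instance

def pvWitness_parse_timing_output_py : String := "time 1\nsize 2kb"

def Spec_parse_timing_output_py (stdout : String) (out : List (String × String)) : Prop := out = parse_timing_output_py_alt stdout
instance (stdout : String) (out : List (String × String)) : Decidable (Spec_parse_timing_output_py stdout out) := by unfold Spec_parse_timing_output_py; infer_instance

-- ===== CLAIM (what is proved, stated in full; the proofs are below) =====
def Claim_equal_parse_timing_output_py : Prop := ∀ (stdout : String), Dom_parse_timing_output_py stdout → Pre_parse_timing_output_py stdout → Spec_parse_timing_output_py stdout (parse_timing_output_py stdout)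

-- ===== LEMMAS AND PROOFS =====

-- the dict that A's fold assembles, as a function of the stripped line list
def pvAssemble (ls : List String) : List (String × String) :=
  match (ls.filter pvIsTiming).getLast?, (ls.filter pvIsSize).getLast? with
  | none, none => []
  | none, some s => [("raw_size_line", s)]
  | some t, none => [("raw_timing_line", t)]
  | some t, some s =>
    if pvIsTiming ((ls.find? (fun l => pvIsTiming l || pvIsSize l)).getD "") then
      [("raw_timing_line", t), ("raw_size_line", s)]
    else
      [("raw_size_line", s), ("raw_timing_line", t)]

-- A's loop body on stripped lines
def pvStep (d : PySem.Dict String String) (l : String) : PySem.Dict String String :=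
  let d := if pvIsTiming l then d.insert "raw_timing_line" l else d
  if pvIsSize l then d.insert "raw_size_line" l else d

theorem pvGetLast?_filter_append (p : String → Bool) (ls : List String) (l : String) :
    ((ls ++ [l]).filter p).getLast? = if p l then some l else (ls.filter p).getLast? := by
  simp [List.filter_append]
  split <;> simp

theorem pvNoMatch (p : String → Bool) (ls : List String)
    (h : (ls.filter p).getLast? = none) : ∀ x ∈ ls, p x = false := by
  intro x hx
  rw [List.getLast?_eq_none_iff] at h
  simpa using List.filter_eq_nil_iff.mp h x hx

theorem pvFind_none (ls : List String)
    (hT : (ls.filter pvIsTiming).getLast? = none)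
    (hS : (ls.filter pvIsSize).getLast? = none) :
    ls.find? (fun l => pvIsTiming l || pvIsSize l) = none := by
  rw [List.find?_eq_none]
  intro x hx
  simp [pvNoMatch _ _ hT x hx, pvNoMatch _ _ hS x hx]

theorem pvFind_timing (ls : List String) (t : String)
    (hT : (ls.filter pvIsTiming).getLast? = some t)
    (hS : (ls.filter pvIsSize).getLast? = none) (d : String) :
    pvIsTiming ((ls.find? (fun l => pvIsTiming l || pvIsSize l)).getD d) = true := by
  have hne : ls.filter pvIsTiming ≠ [] := by intro h; simp [h] at hT
  obtain ⟨x, hx⟩ := List.exists_mem_of_ne_nil _ hne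
  obtain ⟨hmemx, hpx⟩ := List.mem_filter.mp hx
  cases hf : ls.find? (fun l => pvIsTiming l || pvIsSize l) with
  | none =>
    exfalso
    rw [List.find?_eq_none] at hf
    exact absurd (by simp [hpx]) (hf x hmemx)
  | some y =>
    have hy := List.find?_some hf
    have hSy : pvIsSize y = false := pvNoMatch _ _ hS y (List.mem_of_find?_eq_some hf)
    simp only [hSy, Bool.or_false] at hy
    simp [hy]

theorem pvFind_size (ls : List String) (s : String)
    (hT : (ls.filter pvIsTiming).getLast? = none)
    (hS : (ls.filter pvIsSize).getLast? = some s) (d : String) :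
    pvIsTiming ((ls.find? (fun l => pvIsTiming l || pvIsSize l)).getD d) = false := by
  have hne : ls.filter pvIsSize ≠ [] := by intro h; simp [h] at hS
  obtain ⟨x, hx⟩ := List.exists_mem_of_ne_nil _ hne
  obtain ⟨hmemx, hpx⟩ := List.mem_filter.mp hx
  cases hf : ls.find? (fun l => pvIsTiming l || pvIsSize l) with
  | none =>
    exfalso
    rw [List.find?_eq_none] at hf
    exact absurd (by simp [hpx]) (hf x hmemx)
  | some y =>
    exact pvNoMatch _ _ hT y (List.mem_of_find?_eq_some hf)

theorem pvFind_some (ls : List String) (t : String)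
    (hT : (ls.filter pvIsTiming).getLast? = some t) :
    ∃ y, ls.find? (fun l => pvIsTiming l || pvIsSize l) = some y := by
  have hne : ls.filter pvIsTiming ≠ [] := by intro h; simp [h] at hT
  obtain ⟨x, hx⟩ := List.exists_mem_of_ne_nil _ hne
  obtain ⟨hmemx, hpx⟩ := List.mem_filter.mp hx
  cases hf : ls.find? (fun l => pvIsTiming l || pvIsSize l) with
  | none =>
    exfalso
    rw [List.find?_eq_none] at hf
    exact absurd (by simp [hpx]) (hf x hmemx)
  | some y => exact ⟨y, rfl⟩

theorem pvFoldl_items (ls : List String) :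
    (ls.foldl pvStep PySem.Dict.empty).items = pvAssemble ls := by
  induction ls using List.reverseRecOn with
  | nil => rfl
  | append_singleton ls l ih =>
    rw [List.foldl_append]
    have hd : ls.foldl pvStep PySem.Dict.empty = PySem.Dict.mk (pvAssemble ls) := by
      apply PySem.Dict.ext; simpa using ih
    rw [hd]
    unfold pvAssemble
    rw [pvGetLast?_filter_append, pvGetLast?_filter_append]
    rcases hT : (ls.filter pvIsTiming).getLast? with _ | t <;>
      rcases hS : (ls.filter pvIsSize).getLast? with _ | s
    · by_cases hTl : pvIsTiming l <;> by_cases hSl : pvIsSize l <;>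
        simp [pvStep, hTl, hSl, PySem.Dict.insert, PySem.Dict.contains,
          List.find?_append, pvFind_none ls hT hS]
    · by_cases hTl : pvIsTiming l <;> by_cases hSl : pvIsSize l <;>
        simp [pvStep, hTl, hSl, PySem.Dict.insert, PySem.Dict.contains,
          List.find?_append, pvFind_size ls s hT hS]
    · by_cases hTl : pvIsTiming l <;> by_cases hSl : pvIsSize l <;>
        simp [pvStep, hTl, hSl, PySem.Dict.insert, PySem.Dict.contains,
          List.find?_append, pvFind_timing ls t hT hS]
    · obtain ⟨y, hy⟩ := pvFind_some ls t hT
      by_cases hTy : pvIsTiming y <;>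
        by_cases hTl : pvIsTiming l <;> by_cases hSl : pvIsSize l <;>
        simp [pvStep, hTl, hSl, hy, hTy, PySem.Dict.insert, PySem.Dict.contains,
          List.find?_append]

theorem pvScan_eq (ls : List String) (t s : Option String) :
    pvScan ls.reverse t s =
      (t.or ((ls.map PySem.Str.strip).filter pvIsTiming).getLast?,
       s.or ((ls.map PySem.Str.strip).filter pvIsSize).getLast?) := by
  induction ls using List.reverseRecOn generalizing t s with
  | nil => cases t <;> cases s <;> simp [pvScan]
  | append_singleton ls l ih =>
    rw [List.reverse_append]
    simp only [List.reverse_cons, List.reverse_nil, List.nil_append, List.singleton_append,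
      List.map_append, List.map_cons, List.map_nil]
    rw [pvGetLast?_filter_append, pvGetLast?_filter_append]
    rcases t with _ | a <;> rcases s with _ | b <;>
      by_cases hT : pvIsTiming (PySem.Str.strip l) <;>
      by_cases hS : pvIsSize (PySem.Str.strip l) <;>
      simp [pvScan, hT, hS, ih, Option.or]

theorem pvAny_of_getLast? (p : String → Bool) (ls : List String) (t : String)
    (h : (ls.filter p).getLast? = some t) : ls.any p = true := by
  have hne : ls.filter p ≠ [] := by intro hh; simp [hh] at h
  obtain ⟨x, hx⟩ := List.exists_mem_of_ne_nil _ hne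
  obtain ⟨hm, hp⟩ := List.mem_filter.mp hx
  exact List.any_eq_true.mpr ⟨x, hm, hp⟩

-- ===== VERDICT (by name: the statement is the Claim_ definition above) =====
theorem parse_timing_output_py_spec : Claim_equal_parse_timing_output_py := by
  intro stdout _ hpre
  unfold Spec_parse_timing_output_py parse_timing_output_py parse_timing_output_py_alt
  unfold Pre_parse_timing_output_py at hpre
  rw [show (fun (d : PySem.Dict String String) line =>
    let line := PySem.Str.strip line
    let d :=
      if PySem.Str.isIn "time" (PySem.Str.lower line) || PySem.Str.isIn "seconds" (PySem.Str.lower line) then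
        d.insert "raw_timing_line" line
      else d
    if PySem.Str.isIn "kb" (PySem.Str.lower line) || PySem.Str.isIn "size" (PySem.Str.lower line) then
      d.insert "raw_size_line" line
    else d) = fun d line => pvStep d (PySem.Str.strip line) from rfl]
  simp only []
  rw [show (List.foldl (fun d line => pvStep d (PySem.Str.strip line)) PySem.Dict.empty
      ((PySem.Str.split? stdout "\n").getD [])) =
    List.foldl pvStep PySem.Dict.empty
      (((PySem.Str.split? stdout "\n").getD []).map PySem.Str.strip) from (List.foldl_map).symm,
    pvFoldl_items, pvScan_eq]
  set ls := ((PySem.Str.split? stdout "\n").getD []).map PySem.Str.strip with hls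
  simp only [Option.or] at *
  unfold pvAssemble
  rcases hT : (ls.filter pvIsTiming).getLast? with _ | t <;>
    rcases hS : (ls.filter pvIsSize).getLast? with _ | s
  · rfl
  · rfl
  · rfl
  · have hF := hpre ⟨pvAny_of_getLast? _ _ _ hT, pvAny_of_getLast? _ _ _ hS⟩
    simp [hF]
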